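-- pv_equiv track=rewrite | github.com/rapid131/PythonTerminalWordleClone | WordleClone.py | show_alphabet
-- ===== SOURCE A (Python) =====
-- def show_alphabet(wordle_word,my_guessing_word,alphabet_color):
--     #This is a program for returning an array of 26 colors that can be applied to an alphabet and printed out
--     alphabet= 'ABCDEFGHIJKLMNOPQRSTUVWXYZ'
--     wordle_word=wordle_word.upper()
--     my_guessing_word = my_guessing_word.upper()
--     for count in range(0,len(wordle_word)):
--         if alphabet_color[alphabet.index(my_guessing_word[count])]=='green': #This leaves the [count] letter of the alphabet alone if it is already green and keeps it green
--             continue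
--         if my_guessing_word[count]==wordle_word[count]:
--             alphabet_color[alphabet.index(my_guessing_word[count])]='green'
--         elif my_guessing_word[count] in wordle_word and my_guessing_word[count]!=wordle_word[count]:
--             alphabet_color[alphabet.index(my_guessing_word[count])]='yellow'
--         elif my_guessing_word[count] not in wordle_word:
--             alphabet_color[alphabet.index(my_guessing_word[count])]='grey'
--     return alphabet_color
-- ===== SOURCE B (Python) =====
-- # B: precompute exact-match and presence sets once, then color each DISTINCT
-- # guessed letter, instead of rescanning the words per position.
-- # Like A, mutates alphabet_color in place and returns it.
-- def show_alphabet(wordle_word, my_guessing_word, alphabet_color):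
--     alphabet = 'ABCDEFGHIJKLMNOPQRSTUVWXYZ'
--     w = wordle_word.upper()
--     g = my_guessing_word.upper()
--     exact = {x for x, y in zip(g, w) if x == y}
--     present = set(w)
--     for c in set(g[:len(w)]):
--         i = alphabet.index(c)
--         if alphabet_color[i] != 'green':
--             if c in exact:
--                 alphabet_color[i] = 'green'
--             elif c in present:
--                 alphabet_color[i] = 'yellow'
--             else:
--                 alphabet_color[i] = 'grey'
--     return alphabet_color
-- ===== Notes on version B (the rewrite author's own statement) =====
-- stated objective: alternative
-- what changed: B precomputes the exact-match letter set (from zip) and the wordle-letter presence set once, then colors each distinct guessed letter with O(1) set lookups, instead of A's per-position loop that rescans the wordle word with 'in' at every position.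
import Mathlib
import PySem

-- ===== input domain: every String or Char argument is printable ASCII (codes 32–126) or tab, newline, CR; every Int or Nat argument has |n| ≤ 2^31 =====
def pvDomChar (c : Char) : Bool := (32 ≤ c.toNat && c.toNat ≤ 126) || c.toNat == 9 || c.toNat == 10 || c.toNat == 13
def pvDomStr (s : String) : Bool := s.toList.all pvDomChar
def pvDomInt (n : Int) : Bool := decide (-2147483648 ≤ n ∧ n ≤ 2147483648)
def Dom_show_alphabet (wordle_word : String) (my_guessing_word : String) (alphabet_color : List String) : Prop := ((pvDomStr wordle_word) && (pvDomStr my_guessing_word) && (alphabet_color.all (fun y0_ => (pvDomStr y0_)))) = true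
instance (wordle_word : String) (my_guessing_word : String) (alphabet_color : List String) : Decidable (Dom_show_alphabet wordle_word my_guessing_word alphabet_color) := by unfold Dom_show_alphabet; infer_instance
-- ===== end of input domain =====

-- B precomputes the exact-match set and the presence set once and colors each DISTINCT
-- guessed letter, instead of rescanning the words per position (objective: alternative).
-- Both A and B mutate alphabet_color in place; the equivalence proved here is about the return value.

-- shared helper: the alphabet constant and 'alphabet.index(c)' (both Python versions have these lines)
def alf : List Char := "ABCDEFGHIJKLMNOPQRSTUVWXYZ".toList
def Jdx (c : Char) : Nat := (PySem.List.index? alf c).getD 0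

-- ===== PORT A =====
-- loop body of A (one position count = i)
def showA_step (W : List Char) (G : List Char) (s : List String) (i : Nat) : List String :=
  let c := G.getD i ' '                              -- my_guessing_word[count]; exact under Pre_
  let j := Jdx c                                     -- alphabet.index(...); exact under Pre_ (ValueError excluded)
  if s.getD j "" == "green" then s                   -- reads alphabet_color[j]; in range under Pre_
  else if c == W.getD i ' ' then s.set j "green"
  else if PySem.Chars.isIn [c] W && !(c == W.getD i ' ') then s.set j "yellow"
  else if !(PySem.Chars.isIn [c] W) then s.set j "grey"
  else s

def show_alphabet (wordle_word : String) (my_guessing_word : String) (alphabet_color : List String) : List String :=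
  let W := PySem.Chars.upper wordle_word.toList
  let G := PySem.Chars.upper my_guessing_word.toList
  (List.range W.length).foldl (showA_step W G) alphabet_color

-- ===== PORT B =====
-- loop body of B (one distinct letter c)
def showB_step (exact : PySem.Set Char) (present : PySem.Set Char) (s : List String) (c : Char) : List String :=
  let j := Jdx c
  if !(s.getD j "" == "green") then
    if PySem.Set.contains exact c then s.set j "green"
    else if PySem.Set.contains present c then s.set j "yellow"
    else s.set j "grey"
  else s

-- the per-letter result does not depend on the iteration order of Python's set
-- (distinct letters touch distinct indices), so folding in first-occurrence order is exact
def show_alphabet_alt (wordle_word : String) (my_guessing_word : String) (alphabet_color : List String) : List String :=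
  let W := PySem.Chars.upper wordle_word.toList
  let G := PySem.Chars.upper my_guessing_word.toList
  let exact : PySem.Set Char := PySem.Set.ofList (((G.zip W).filter (fun p => p.1 == p.2)).map (fun p => p.1))
  let present : PySem.Set Char := PySem.Set.ofList W
  (PySem.Set.ofList (G.take W.length)).foldl (showB_step exact present) alphabet_color

-- ===== PRECONDITION & SPEC =====
-- Pre_ excludes exactly the inputs where A raises: a guess shorter than the wordle word
-- (IndexError), a guessed character that is not a letter (ValueError from alphabet.index),
-- and an alphabet_color list too short for a used letter's index (IndexError).
def Pre_show_alphabet (wordle_word : String) (my_guessing_word : String) (alphabet_color : List String) : Prop :=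
  (PySem.Chars.upper wordle_word.toList).length ≤ (PySem.Chars.upper my_guessing_word.toList).length ∧
  ((PySem.Chars.upper my_guessing_word.toList).take (PySem.Chars.upper wordle_word.toList).length).all
    (fun c => alf.contains c && decide (Jdx c < alphabet_color.length)) = true
instance (wordle_word : String) (my_guessing_word : String) (alphabet_color : List String) : Decidable (Pre_show_alphabet wordle_word my_guessing_word alphabet_color) := by unfold Pre_show_alphabet; infer_instance

def pvWitness_show_alphabet : String × String × List String := ("AB", "BA", ["white", "white"])

def Spec_show_alphabet (wordle_word : String) (my_guessing_word : String) (alphabet_color : List String) (out : List String) : Prop := out = show_alphabet_alt wordle_word my_guessing_word alphabet_color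
instance (wordle_word : String) (my_guessing_word : String) (alphabet_color : List String) (out : List String) : Decidable (Spec_show_alphabet wordle_word my_guessing_word alphabet_color out) := by unfold Spec_show_alphabet; infer_instance

-- ===== CLAIM (what is proved, stated in full; the proofs are below) =====
def Claim_equal_show_alphabet : Prop := ∀ (wordle_word : String) (my_guessing_word : String) (alphabet_color : List String), Dom_show_alphabet wordle_word my_guessing_word alphabet_color → Pre_show_alphabet wordle_word my_guessing_word alphabet_color → Spec_show_alphabet wordle_word my_guessing_word alphabet_color (show_alphabet wordle_word my_guessing_word alphabet_color)

-- ===== LEMMAS AND PROOFS =====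

theorem pv_getD_set_self {α : Type} [Inhabited α] (s : List α) (j : Nat) (hj : j < s.length) (v d : α) :
    (s.set j v).getD j d = v := by
  simp [List.getD_eq_getElem?_getD, hj]

theorem pv_getD_set_ne {α : Type} [Inhabited α] (s : List α) (j jj : Nat) (h : jj ≠ j) (v d : α) :
    (s.set j v).getD jj d = s.getD jj d := by
  simp [List.getD_eq_getElem?_getD, h.symm]

-- exact-match among the first n positions (abbrev so the if in targetM finds decidability)
abbrev exCond (W G : List Char) (n : Nat) (c : Char) : Prop :=
  ∃ i < n, G.getD i ' ' = c ∧ W.getD i ' ' = c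

def targetM (W G : List Char) (n : Nat) (c : Char) : String :=
  if exCond W G n c then "green" else if c ∈ W then "yellow" else "grey"

-- index injectivity on alphabet members
theorem Jdx_inj {c c' : Char} (hc : c ∈ alf) (hc' : c' ∈ alf) (h : Jdx c = Jdx c') : c = c' := by
  obtain ⟨k, hk⟩ := Option.isSome_iff_exists.mp ((PySem.List.index?_isSome_iff alf c).mpr hc)
  obtain ⟨k', hk'⟩ := Option.isSome_iff_exists.mp ((PySem.List.index?_isSome_iff alf c').mpr hc')
  obtain ⟨hlt, hg, -⟩ := PySem.List.getElem_of_index?_eq_some hk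
  obtain ⟨hlt', hg', -⟩ := PySem.List.getElem_of_index?_eq_some hk'
  unfold Jdx at h
  rw [hk, hk'] at h
  simp at h
  subst h
  rw [← hg, ← hg']

theorem isIn_singleton (c : Char) (W : List Char) : PySem.Chars.isIn [c] W = true ↔ c ∈ W := by
  rw [PySem.Chars.isIn_iff_infix]
  constructor
  · intro h; exact h.subset (by simp)
  · intro h
    obtain ⟨l1, l2, rfl⟩ := List.append_of_mem h
    exact ⟨l1, l2, by simp⟩

theorem mem_take_of_lt (G : List Char) (wl i : Nat) (hi : i < wl) (hwl : wl ≤ G.length) :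
    G.getD i ' ' ∈ G.take wl := by
  have hi' : i < G.length := lt_of_lt_of_le hi hwl
  rw [List.getD_eq_getElem _ _ hi']
  have h2 : i < (G.take wl).length := by simp; omega
  have h3 : (G.take wl)[i] = G[i] := List.getElem_take
  rw [← h3]
  exact List.getElem_mem h2

theorem exCond_succ (W G : List Char) (n : Nat) (c' : Char) :
    exCond W G (n+1) c' ↔ exCond W G n c' ∨ (G.getD n ' ' = c' ∧ W.getD n ' ' = c') := by
  unfold exCond
  constructor
  · rintro ⟨i, hi, h⟩
    rcases Nat.lt_succ_iff_lt_or_eq.mp hi with h' | rfl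
    · exact Or.inl ⟨i, h', h⟩
    · exact Or.inr h
  · rintro (⟨i, hi, h⟩ | h)
    · exact ⟨i, Nat.lt_succ_of_lt hi, h⟩
    · exact ⟨n, Nat.lt_succ_self n, h⟩

theorem showA_step_eq (W G : List Char) (s : List String) (i : Nat) :
    showA_step W G s i =
      if s.getD (Jdx (G.getD i ' ')) "" == "green" then s
      else if G.getD i ' ' == W.getD i ' ' then s.set (Jdx (G.getD i ' ')) "green"
      else if PySem.Chars.isIn [G.getD i ' '] W && !(G.getD i ' ' == W.getD i ' ') then s.set (Jdx (G.getD i ' ')) "yellow"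
      else if !(PySem.Chars.isIn [G.getD i ' '] W) then s.set (Jdx (G.getD i ' ')) "grey"
      else s := rfl

theorem targetM_stable (W G : List Char) (n : Nat) (c' : Char) (h : G.getD n ' ' ≠ c') :
    targetM W G (n+1) c' = targetM W G n c' := by
  unfold targetM
  have : exCond W G (n+1) c' ↔ exCond W G n c' := by
    rw [exCond_succ]
    exact ⟨fun h' => h'.elim id (fun h2 => absurd h2.1 h), Or.inl⟩
  simp only [this]

-- A's loop invariant
theorem invA (W G : List Char) (ac : List String)
    (hlen : W.length ≤ G.length)
    (hmem : ∀ c ∈ G.take W.length, c ∈ alf ∧ Jdx c < ac.length)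
    (n : Nat) (hn : n ≤ W.length) :
    ((List.range n).foldl (showA_step W G) ac).length = ac.length ∧
    (∀ jj, (∀ i < n, Jdx (G.getD i ' ') ≠ jj) →
      ((List.range n).foldl (showA_step W G) ac).getD jj "" = ac.getD jj "") ∧
    (∀ i < n,
      ((List.range n).foldl (showA_step W G) ac).getD (Jdx (G.getD i ' ')) "" =
        if ac.getD (Jdx (G.getD i ' ')) "" = "green" then "green" else targetM W G n (G.getD i ' ')) := by
  induction n with
  | zero => exact ⟨rfl, fun jj _ => rfl, fun i hi => absurd hi (Nat.not_lt_zero i)⟩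
  | succ n IH =>
    have hn' : n ≤ W.length := Nat.le_of_succ_le hn
    obtain ⟨IH1, IH2, IH3⟩ := IH hn'
    have hfold : (List.range (n+1)).foldl (showA_step W G) ac
        = showA_step W G ((List.range n).foldl (showA_step W G) ac) n := by
      rw [List.range_succ, List.foldl_append]; rfl
    generalize hsdef : (List.range n).foldl (showA_step W G) ac = s at *
    have hnW : n < W.length := hn
    have hnG : n < G.length := lt_of_lt_of_le hnW hlen
    have hcmem : G.getD n ' ' ∈ G.take W.length := mem_take_of_lt G W.length n hnW hlen
    have hcal : G.getD n ' ' ∈ alf := (hmem _ hcmem).1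
    have hjlt : Jdx (G.getD n ' ') < ac.length := (hmem _ hcmem).2
    have hjlt' : Jdx (G.getD n ' ') < s.length := by rw [IH1]; exact hjlt
    have uniq : ∀ i, i < W.length → Jdx (G.getD i ' ') = Jdx (G.getD n ' ') → G.getD i ' ' = G.getD n ' ' := by
      intro i hi hji
      exact Jdx_inj (hmem _ (mem_take_of_lt G W.length i hi hlen)).1 hcal hji
    -- value of s at the touched index
    have hsj : s.getD (Jdx (G.getD n ' ')) ""
        = if (∃ i < n, G.getD i ' ' = G.getD n ' ') then
            (if ac.getD (Jdx (G.getD n ' ')) "" = "green" then "green" else targetM W G n (G.getD n ' '))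
          else ac.getD (Jdx (G.getD n ' ')) "" := by
      by_cases hocc : ∃ i < n, G.getD i ' ' = G.getD n ' '
      · rw [if_pos hocc]
        obtain ⟨i, hi, hgi⟩ := hocc
        have h3 := IH3 i hi
        rw [hgi] at h3
        exact h3
      · rw [if_neg hocc]
        exact IH2 _ (fun i hi hji => hocc ⟨i, hi, uniq i (lt_of_lt_of_le hi hn') hji⟩)
    rw [hfold, showA_step_eq]
    by_cases hgreen : s.getD (Jdx (G.getD n ' ')) "" = "green"
    case pos =>
      -- skip branch
      rw [if_pos (show (s.getD (Jdx (G.getD n ' ')) "" == "green") = true by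
        simp only [beq_iff_eq]; exact hgreen)]
      refine ⟨IH1, ?_, ?_⟩
      · intro jj hjj
        exact IH2 jj (fun i hi => hjj i (Nat.lt_succ_of_lt hi))
      · intro i hi
        by_cases hic : G.getD i ' ' = G.getD n ' '
        · rw [hic]
          by_cases hacg : ac.getD (Jdx (G.getD n ' ')) "" = "green"
          · rw [if_pos hacg]; exact hgreen
          · rw [if_neg hacg]
            have hg0 := hgreen
            rw [hsj] at hg0
            by_cases hocc : ∃ i < n, G.getD i ' ' = G.getD n ' '
            · rw [if_pos hocc, if_neg hacg] at hg0
              have hex : exCond W G n (G.getD n ' ') := by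
                by_contra hne
                unfold targetM at hg0
                rw [if_neg hne] at hg0
                by_cases hW : G.getD n ' ' ∈ W
                · rw [if_pos hW] at hg0; exact absurd hg0 (by decide)
                · rw [if_neg hW] at hg0; exact absurd hg0 (by decide)
              have hex1 : exCond W G (n+1) (G.getD n ' ') := (exCond_succ W G n _).mpr (Or.inl hex)
              rw [hgreen]
              unfold targetM
              rw [if_pos hex1]
            · rw [if_neg hocc] at hg0
              exact absurd hg0 hacg
        · have hi' : i < n := by
            rcases Nat.lt_succ_iff_lt_or_eq.mp hi with h | rfl
            · exact h
            · exact absurd rfl hic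
          rw [targetM_stable W G n _ (fun h => hic h.symm)]
          exact IH3 i hi'
    case neg =>
      rw [if_neg (show ¬ (s.getD (Jdx (G.getD n ' ')) "" == "green") = true by
        simp only [beq_iff_eq]; exact hgreen)]
      have hacg : ac.getD (Jdx (G.getD n ' ')) "" ≠ "green" := by
        intro hacg
        apply hgreen
        rw [hsj, hacg]
        by_cases hocc : ∃ i < n, G.getD i ' ' = G.getD n ' '
        · rw [if_pos hocc, if_pos rfl]
        · rw [if_neg hocc]
      have hnoex : ¬ exCond W G n (G.getD n ' ') := by
        intro hex
        apply hgreen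
        have hocc : ∃ i < n, G.getD i ' ' = G.getD n ' ' := by
          obtain ⟨i, hi, hg, -⟩ := hex
          exact ⟨i, hi, hg⟩
        rw [hsj, if_pos hocc, if_neg hacg]
        unfold targetM
        rw [if_pos hex]
      -- common pieces for the three writing branches
      have comp1 : ∀ v, (s.set (Jdx (G.getD n ' ')) v).length = ac.length := by
        intro v; rw [List.length_set]; exact IH1
      have comp2 : ∀ v, ∀ jj, (∀ i < n+1, Jdx (G.getD i ' ') ≠ jj) →
          (s.set (Jdx (G.getD n ' ')) v).getD jj "" = ac.getD jj "" := by
        intro v jj hjj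
        rw [pv_getD_set_ne s _ jj (fun h => hjj n (Nat.lt_succ_self n) h.symm) v ""]
        exact IH2 jj (fun i hi => hjj i (Nat.lt_succ_of_lt hi))
      have comp3 : ∀ v, targetM W G (n+1) (G.getD n ' ') = v →
          ∀ i < n+1, (s.set (Jdx (G.getD n ' ')) v).getD (Jdx (G.getD i ' ')) "" =
            if ac.getD (Jdx (G.getD i ' ')) "" = "green" then "green" else targetM W G (n+1) (G.getD i ' ') := by
        intro v hv i hi
        by_cases hic : G.getD i ' ' = G.getD n ' '
        · rw [hic, pv_getD_set_self s _ hjlt' v "", if_neg hacg, hv]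
        · have hi' : i < n := by
            rcases Nat.lt_succ_iff_lt_or_eq.mp hi with h | rfl
            · exact h
            · exact absurd rfl hic
          have hjne : Jdx (G.getD i ' ') ≠ Jdx (G.getD n ' ') :=
            fun h => hic (uniq i (lt_of_lt_of_le hi' hn') h)
          rw [pv_getD_set_ne s _ _ hjne v ""]
          rw [targetM_stable W G n _ (fun h => hic h.symm)]
          exact IH3 i hi'
      by_cases heq : G.getD n ' ' = W.getD n ' '
      case pos =>
        rw [if_pos (show (G.getD n ' ' == W.getD n ' ') = true by simp only [beq_iff_eq]; exact heq)]
        have hex : exCond W G (n+1) (G.getD n ' ') :=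
          (exCond_succ W G n _).mpr (Or.inr ⟨rfl, heq.symm⟩)
        exact ⟨comp1 _, comp2 _, comp3 _ (by unfold targetM; rw [if_pos hex])⟩
      case neg =>
        have hex1 : ¬ exCond W G (n+1) (G.getD n ' ') := by
          intro hex
          rcases (exCond_succ W G n _).mp hex with h | h
          · exact hnoex h
          · exact heq h.2.symm
        have hneq : ¬ (G.getD n ' ' == W.getD n ' ') = true := by simp only [beq_iff_eq]; exact heq
        by_cases hin : G.getD n ' ' ∈ W
        case pos =>
          rw [if_neg hneq, if_pos (by
            rw [Bool.and_eq_true]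
            exact ⟨(isIn_singleton _ W).mpr hin, by simp only [Bool.not_eq_eq_eq_not, Bool.not_true, beq_eq_false_iff_ne, ne_eq]; exact heq⟩)]
          exact ⟨comp1 _, comp2 _, comp3 _ (by unfold targetM; rw [if_neg hex1, if_pos hin])⟩
        case neg =>
          have hisin : PySem.Chars.isIn [G.getD n ' '] W = false := by
            rcases Bool.eq_false_or_eq_true (PySem.Chars.isIn [G.getD n ' '] W) with h | h
            · exact absurd ((isIn_singleton _ W).mp h) hin
            · exact h
          rw [if_neg hneq,
            if_neg (show ¬ (PySem.Chars.isIn [G.getD n ' '] W && !(G.getD n ' ' == W.getD n ' ')) = true by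
              intro hh
              have h1 : PySem.Chars.isIn [G.getD n ' '] W = true := (Bool.and_eq_true _ _ |>.mp hh).1
              rw [hisin] at h1
              exact Bool.false_ne_true h1),
            if_pos (show (!(PySem.Chars.isIn [G.getD n ' '] W)) = true by rw [hisin]; rfl)]
          exact ⟨comp1 _, comp2 _, comp3 _ (by unfold targetM; rw [if_neg hex1, if_neg hin])⟩

def targetB (exact present : PySem.Set Char) (c : Char) : String :=
  if PySem.Set.contains exact c then "green" else if PySem.Set.contains present c then "yellow" else "grey"

theorem showB_step_eq (exact present : PySem.Set Char) (ac : List String) (c : Char) :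
    showB_step exact present ac c =
      if ac.getD (Jdx c) "" = "green" then ac else ac.set (Jdx c) (targetB exact present c) := by
  unfold showB_step targetB
  by_cases hg : ac.getD (Jdx c) "" = "green" <;>
    by_cases h1 : c ∈ exact <;>
      by_cases h2 : c ∈ present <;>
        simp [h1, h2]

-- B's loop invariant
theorem invB (exact present : PySem.Set Char) (L : List Char) (ac : List String)
    (hL : L.Nodup) (hmem : ∀ c ∈ L, c ∈ alf ∧ Jdx c < ac.length) :
    (L.foldl (showB_step exact present) ac).length = ac.length ∧
    (∀ jj, (∀ c ∈ L, Jdx c ≠ jj) →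
      (L.foldl (showB_step exact present) ac).getD jj "" = ac.getD jj "") ∧
    (∀ c ∈ L,
      (L.foldl (showB_step exact present) ac).getD (Jdx c) "" =
        if ac.getD (Jdx c) "" = "green" then "green" else targetB exact present c) := by
  induction L generalizing ac with
  | nil => exact ⟨rfl, fun jj _ => rfl, fun c hc => absurd hc (List.not_mem_nil)⟩
  | cons c L IH =>
    obtain ⟨hcL, hLnd⟩ := List.nodup_cons.mp hL
    have hcal : c ∈ alf := (hmem c List.mem_cons_self).1
    have hjlt : Jdx c < ac.length := (hmem c List.mem_cons_self).2
    have hfold : (c :: L).foldl (showB_step exact present) ac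
        = L.foldl (showB_step exact present) (showB_step exact present ac c) := rfl
    have hlen' : (showB_step exact present ac c).length = ac.length := by
      rw [showB_step_eq]
      by_cases hg : ac.getD (Jdx c) "" = "green"
      · rw [if_pos hg]
      · rw [if_neg hg, List.length_set]
    have hgetne : ∀ jj, jj ≠ Jdx c → (showB_step exact present ac c).getD jj "" = ac.getD jj "" := by
      intro jj hjj
      rw [showB_step_eq]
      by_cases hg : ac.getD (Jdx c) "" = "green"
      · rw [if_pos hg]
      · rw [if_neg hg, pv_getD_set_ne ac _ jj hjj _ ""]
    have hgetj : (showB_step exact present ac c).getD (Jdx c) ""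
        = if ac.getD (Jdx c) "" = "green" then "green" else targetB exact present c := by
      rw [showB_step_eq]
      by_cases hg : ac.getD (Jdx c) "" = "green"
      · rw [if_pos hg, if_pos hg, hg]
      · rw [if_neg hg, if_neg hg, pv_getD_set_self ac _ hjlt _ ""]
    have hmem' : ∀ c' ∈ L, c' ∈ alf ∧ Jdx c' < (showB_step exact present ac c).length := by
      intro c' hc'
      rw [hlen']
      exact hmem c' (List.mem_cons_of_mem c hc')
    obtain ⟨IH1, IH2, IH3⟩ := IH (showB_step exact present ac c) hLnd hmem'
    refine ⟨?_, ?_, ?_⟩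
    · rw [hfold, IH1, hlen']
    · intro jj hjj
      rw [hfold, IH2 jj (fun c' hc' => hjj c' (List.mem_cons_of_mem c hc'))]
      exact hgetne jj (fun h => hjj c List.mem_cons_self h.symm)
    · intro c'' hc''
      rcases List.mem_cons.mp hc'' with rfl | hc''L
      · have huntouched : ∀ c' ∈ L, Jdx c' ≠ Jdx c'' := by
          intro c' hc' h
          exact hcL (Jdx_inj (hmem c' (List.mem_cons_of_mem c'' hc')).1 hcal h ▸ hc')
        rw [hfold, IH2 _ huntouched]
        exact hgetj
      · have hne : Jdx c'' ≠ Jdx c := by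
          intro h
          exact hcL (Jdx_inj (hmem c'' (List.mem_cons_of_mem c hc''L)).1 hcal h ▸ hc''L)
        rw [hfold, IH3 c'' hc''L, hgetne _ hne]

theorem mem_take_index (G : List Char) (wl : Nat) (hwl : wl ≤ G.length) (c : Char)
    (h : c ∈ G.take wl) : ∃ i < wl, G.getD i ' ' = c := by
  obtain ⟨i, hi, hgi⟩ := List.mem_iff_getElem.mp h
  have hiwl : i < wl := by
    have := hi; simp at this; omega
  have hiG : i < G.length := lt_of_lt_of_le hiwl hwl
  refine ⟨i, hiwl, ?_⟩
  rw [List.getD_eq_getElem _ _ hiG, ← List.getElem_take (h := hi), hgi]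

theorem exact_set_iff (W G : List Char) (hlen : W.length ≤ G.length) (c : Char) :
    (c ∈ PySem.Set.ofList (((G.zip W).filter (fun p => p.1 == p.2)).map (fun p => p.1))) ↔
      exCond W G W.length c := by
  rw [PySem.Set.mem_ofList]
  constructor
  · intro h
    obtain ⟨p, hp, hpc⟩ := List.mem_map.mp h
    obtain ⟨hpz, hpe⟩ := List.mem_filter.mp hp
    obtain ⟨i, hi, hzi⟩ := List.mem_iff_getElem.mp hpz
    have hiwl : i < W.length := by
      have := hi; simp at this; omega
    have hiG : i < G.length := lt_of_lt_of_le hiwl hlen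
    have hz : p = (G[i], W[i]) := by rw [← hzi]; exact List.getElem_zip
    refine ⟨i, hiwl, ?_, ?_⟩
    · rw [List.getD_eq_getElem _ _ hiG]
      rw [hz] at hpc; exact hpc
    · rw [List.getD_eq_getElem _ _ hiwl]
      have he : p.1 = p.2 := by simpa using hpe
      rw [hz] at he hpc
      simp at he hpc
      rw [← he, hpc]
  · rintro ⟨i, hi, hg, hw⟩
    have hiG : i < G.length := lt_of_lt_of_le hi hlen
    rw [List.getD_eq_getElem _ _ hiG] at hg
    rw [List.getD_eq_getElem _ _ hi] at hw
    refine List.mem_map.mpr ⟨(G[i], W[i]), List.mem_filter.mpr ⟨?_, ?_⟩, hg⟩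
    · refine List.mem_iff_getElem.mpr ⟨i, ?_, List.getElem_zip⟩
      simp; omega
    · simp [hg, hw]

-- ===== VERDICT (by name: the statement is the Claim_ definition above) =====
theorem show_alphabet_spec : Claim_equal_show_alphabet := by
  intro ww gw ac _ hpre
  unfold Spec_show_alphabet
  unfold Pre_show_alphabet at hpre
  obtain ⟨hlen, hall⟩ := hpre
  have hmem : ∀ c ∈ (PySem.Chars.upper gw.toList).take (PySem.Chars.upper ww.toList).length,
      c ∈ alf ∧ Jdx c < ac.length := by
    intro c hc
    have := List.all_eq_true.mp hall c hc
    rw [Bool.and_eq_true] at this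
    exact ⟨List.contains_iff_mem.mp this.1, of_decide_eq_true this.2⟩
  have hA : show_alphabet ww gw ac =
      (List.range (PySem.Chars.upper ww.toList).length).foldl
        (showA_step (PySem.Chars.upper ww.toList) (PySem.Chars.upper gw.toList)) ac := rfl
  have hB : show_alphabet_alt ww gw ac =
      (PySem.Set.ofList ((PySem.Chars.upper gw.toList).take (PySem.Chars.upper ww.toList).length)).foldl
        (showB_step
          (PySem.Set.ofList ((((PySem.Chars.upper gw.toList).zip (PySem.Chars.upper ww.toList)).filter
            (fun p => p.1 == p.2)).map (fun p => p.1)))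
          (PySem.Set.ofList (PySem.Chars.upper ww.toList))) ac := rfl
  obtain ⟨hA1, hA2, hA3⟩ := invA (PySem.Chars.upper ww.toList) (PySem.Chars.upper gw.toList) ac hlen hmem
    (PySem.Chars.upper ww.toList).length (le_refl _)
  have hmemL : ∀ c ∈ PySem.Set.ofList ((PySem.Chars.upper gw.toList).take (PySem.Chars.upper ww.toList).length),
      c ∈ alf ∧ Jdx c < ac.length := by
    intro c hc
    exact hmem c ((PySem.Set.mem_ofList _ _).mp hc)
  obtain ⟨hB1, hB2, hB3⟩ := invB
    (PySem.Set.ofList ((((PySem.Chars.upper gw.toList).zip (PySem.Chars.upper ww.toList)).filter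
      (fun p => p.1 == p.2)).map (fun p => p.1)))
    (PySem.Set.ofList (PySem.Chars.upper ww.toList))
    (PySem.Set.ofList ((PySem.Chars.upper gw.toList).take (PySem.Chars.upper ww.toList).length))
    ac (PySem.Set.nodup_ofList _) hmemL
  rw [hA, hB]
  apply List.ext_getElem
  · rw [hA1, hB1]
  intro j hjA hjB
  have hjac : j < ac.length := by rw [hA1] at hjA; exact hjA
  rw [← List.getD_eq_getElem _ "" hjA, ← List.getD_eq_getElem _ "" hjB]
  by_cases hocc : ∃ i < (PySem.Chars.upper ww.toList).length,
      Jdx ((PySem.Chars.upper gw.toList).getD i ' ') = j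
  · obtain ⟨i, hi, hji⟩ := hocc
    have hcmem : (PySem.Chars.upper gw.toList).getD i ' ' ∈
        (PySem.Chars.upper gw.toList).take (PySem.Chars.upper ww.toList).length :=
      mem_take_of_lt _ _ i hi hlen
    have hcL : (PySem.Chars.upper gw.toList).getD i ' ' ∈
        PySem.Set.ofList ((PySem.Chars.upper gw.toList).take (PySem.Chars.upper ww.toList).length) :=
      (PySem.Set.mem_ofList _ _).mpr hcmem
    rw [← hji]
    rw [hA3 i hi, hB3 _ hcL]
    -- targetM = targetB
    have htt : targetM (PySem.Chars.upper ww.toList) (PySem.Chars.upper gw.toList)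
        (PySem.Chars.upper ww.toList).length ((PySem.Chars.upper gw.toList).getD i ' ')
        = targetB
          (PySem.Set.ofList ((((PySem.Chars.upper gw.toList).zip (PySem.Chars.upper ww.toList)).filter
            (fun p => p.1 == p.2)).map (fun p => p.1)))
          (PySem.Set.ofList (PySem.Chars.upper ww.toList))
          ((PySem.Chars.upper gw.toList).getD i ' ') := by
      unfold targetM targetB
      by_cases hex : exCond (PySem.Chars.upper ww.toList) (PySem.Chars.upper gw.toList)
          (PySem.Chars.upper ww.toList).length ((PySem.Chars.upper gw.toList).getD i ' ')
      · rw [if_pos hex]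
        have hmemx : ((PySem.Chars.upper gw.toList).getD i ' ') ∈
            PySem.Set.ofList ((((PySem.Chars.upper gw.toList).zip (PySem.Chars.upper ww.toList)).filter
              (fun p => p.1 == p.2)).map (fun p => p.1)) :=
          (exact_set_iff _ _ hlen _).mpr hex
        rw [if_pos ((PySem.Set.contains_iff _ _).mpr hmemx)]
      · rw [if_neg hex]
        have hnotex : ¬ (PySem.Set.contains
            (PySem.Set.ofList ((((PySem.Chars.upper gw.toList).zip (PySem.Chars.upper ww.toList)).filter
              (fun p => p.1 == p.2)).map (fun p => p.1)))
            ((PySem.Chars.upper gw.toList).getD i ' ')) = true :=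
          fun h => hex ((exact_set_iff _ _ hlen _).mp ((PySem.Set.contains_iff _ _).mp h))
        rw [if_neg hnotex]
        by_cases hW : ((PySem.Chars.upper gw.toList).getD i ' ') ∈ PySem.Chars.upper ww.toList
        · rw [if_pos hW, if_pos ((PySem.Set.contains_iff _ _).mpr ((PySem.Set.mem_ofList _ _).mpr hW))]
        · rw [if_neg hW, if_neg (fun h => hW ((PySem.Set.mem_ofList _ _).mp ((PySem.Set.contains_iff _ _).mp h)))]
    rw [htt]
  · have huA : ∀ i < (PySem.Chars.upper ww.toList).length,
        Jdx ((PySem.Chars.upper gw.toList).getD i ' ') ≠ j :=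
      fun i hi hji => hocc ⟨i, hi, hji⟩
    have huB : ∀ c ∈ PySem.Set.ofList ((PySem.Chars.upper gw.toList).take
        (PySem.Chars.upper ww.toList).length), Jdx c ≠ j := by
      intro c hc hji
      obtain ⟨i, hi, hgi⟩ := mem_take_index _ _ hlen c ((PySem.Set.mem_ofList _ _).mp hc)
      exact hocc ⟨i, hi, by rw [hgi]; exact hji⟩
    rw [hA2 j huA, hB2 j huB]
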